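-- pv_equiv track=rewrite | github.com/BennyJane/algorithm_mad | niuke/huawei/Q4.py | solution51
-- ===== SOURCE A (Python) =====
-- import math
--
-- def solution51(n):
--     def isPrime(a):
--         if a <= 2:
--             return True
--         end = int(a ** 0.5) +1
--         for i in range(2, end):
--             if a % i == 0:
--                 return False
--         return True
--
--     upper = int(math.pow(n, 0.5)) + 1
--     for x in range(2, upper):
--         if n % x == 0:
--             y = n // x
--             if isPrime(x) and isPrime(y):
--                 return [x, y]
--     return []
-- ===== SOURCE B (Python) =====
-- import math
--
-- def solution51(n):
--     # Reduce n to its full prime factorization by dividing factors out,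
--     # then succeed iff it has exactly two prime factors (with multiplicity).
--     factors = []
--     m = n
--     d = 2
--     while d <= int(math.pow(m, 0.5)):
--         while m % d == 0:
--             factors.append(d)
--             m //= d
--         d += 1
--     if m > 1:
--         factors.append(m)
--     return factors if len(factors) == 2 else []
-- ===== Notes on version B (the rewrite author's own statement) =====
-- stated objective: alternative
-- what changed: Instead of scanning candidate divisors and testing the cofactor's primality with a helper, B computes the full prime factorization of n by repeated trial division (dividing each factor out) and returns the factor list exactly when it has two elements.
import Mathlib
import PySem

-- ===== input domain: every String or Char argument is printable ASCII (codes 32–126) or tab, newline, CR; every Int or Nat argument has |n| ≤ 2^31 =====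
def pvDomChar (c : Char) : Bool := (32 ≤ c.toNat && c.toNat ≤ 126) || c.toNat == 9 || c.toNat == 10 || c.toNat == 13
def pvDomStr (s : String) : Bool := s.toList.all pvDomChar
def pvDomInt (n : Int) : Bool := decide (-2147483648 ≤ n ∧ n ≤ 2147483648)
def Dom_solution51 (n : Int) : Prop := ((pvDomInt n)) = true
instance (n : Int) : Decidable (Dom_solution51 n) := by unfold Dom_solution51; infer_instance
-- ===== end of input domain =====

-- B re-implements A by computing the full prime factorization of n by repeated trial
-- division and returning it exactly when it has two factors; same results, no claimed speedup.

-- ===== PORT A =====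
-- Python's `int(a ** 0.5)` / `int(math.pow(n, 0.5))` is ported as Nat.sqrt, which is exact
-- for every 0 ≤ a ≤ 2^31 (the Dom bound); negative arguments raise in Python (outside Pre_).
def pvIsPrime (a : Int) : Bool :=
  if a ≤ 2 then true
  else
    -- for i in range(2, int(a ** 0.5) + 1): if a % i == 0: return False / return True
    (PySem.List.pyRange 2 ((Nat.sqrt a.toNat : Int) + 1) 1).all (fun i => !(PySem.Int.mod a i == 0))

def solution51 (n : Int) : List Int :=
  -- for x in range(2, int(math.pow(n,0.5)) + 1): if n % x == 0 and isPrime(x) and isPrime(n // x): return [x, n // x] / return []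
  match (PySem.List.pyRange 2 ((Nat.sqrt n.toNat : Int) + 1) 1).find?
      (fun x => PySem.Int.mod n x == 0 && pvIsPrime x && pvIsPrime (PySem.Int.floordiv n x)) with
  | some x => [x, PySem.Int.floordiv n x]
  | none => []

-- ===== PORT B =====
-- termination helper for the inner `while m % d == 0` loop (cited in decreasing_by)
theorem pvFloordivLt {m d : Int} (h1 : PySem.Int.mod m d = 0) (h2 : 1 < d) (h3 : 0 < m) :
    (PySem.Int.floordiv m d).toNat < m.toNat := by
  have hd : d ∣ m := (PySem.Int.mod_eq_zero_iff_dvd m d).mp h1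
  obtain ⟨k, hk⟩ := hd
  have hfd : PySem.Int.floordiv m d = k := by
    rw [PySem.Int.floordiv_eq_ediv_of_pos (by omega), hk]
    exact Int.mul_ediv_cancel_left k (by omega)
  have hkpos : 0 < k := by nlinarith
  have : k < m := by nlinarith
  omega

-- inner `while m % d == 0: factors.append(d); m //= d`.  The guard's extra conjuncts
-- `1 < d ∧ 0 < m` only make the recursion total: they hold at every call Python reaches
-- (d starts at 2 and grows; the loop is entered only when m ≥ d*d).
def pvDivideOut (m d : Int) (acc : List Int) : Int × List Int :=
  if _hg : PySem.Int.mod m d = 0 ∧ 1 < d ∧ 0 < m then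
    pvDivideOut (PySem.Int.floordiv m d) d (acc ++ [d])
  else (m, acc)
termination_by m.toNat
decreasing_by exact pvFloordivLt _hg.1 _hg.2.1 _hg.2.2

theorem pvDivideOut_fst_le (m d : Int) (acc : List Int) :
    (pvDivideOut m d acc).1.toNat ≤ m.toNat := by
  fun_induction pvDivideOut with
  | case1 m acc hg ih =>
      exact le_trans ih (le_of_lt (pvFloordivLt hg.1 hg.2.1 hg.2.2))

  | case2 => simp

-- outer `while d <= int(math.pow(m, 0.5)): <inner>; d += 1`.  The conjunct `2 ≤ d` only
-- makes the recursion total: Python's d starts at 2 and only increases.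
def pvOuter (m d : Int) (acc : List Int) : Int × List Int :=
  if h : 2 ≤ d ∧ d ≤ (Nat.sqrt m.toNat : Int) then
    let r := pvDivideOut m d acc
    pvOuter r.1 (d + 1) r.2
  else (m, acc)
termination_by (Nat.sqrt m.toNat + 2) - d.toNat
decreasing_by
  have h1 := pvDivideOut_fst_le m d acc
  have h2 : Nat.sqrt (pvDivideOut m d acc).1.toNat ≤ Nat.sqrt m.toNat := Nat.sqrt_le_sqrt h1
  have h3 : d.toNat ≤ Nat.sqrt m.toNat := by omega
  have h5 : (d + 1).toNat = d.toNat + 1 := by omega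
  omega

def solution51_alt (n : Int) : List Int :=
  let r := pvOuter n 2 []
  let factors := if 1 < r.1 then r.2 ++ [r.1] else r.2
  if factors.length == 2 then factors else []

-- ===== PRECONDITION & SPEC =====
-- Pre_ excludes exactly negative n, where A raises ValueError (math.pow(n, 0.5)); B raises there too.
def Pre_solution51 (n : Int) : Prop := 0 ≤ n
instance (n : Int) : Decidable (Pre_solution51 n) := by unfold Pre_solution51; infer_instance
def pvWitness_solution51 : Int := (15)

def Spec_solution51 (n : Int) (out : List Int) : Prop := out = solution51_alt n
instance (n : Int) (out : List Int) : Decidable (Spec_solution51 n out) := by unfold Spec_solution51; infer_instance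

-- ===== CLAIM (what is proved, stated in full; the proofs are below) =====
def Claim_equal_solution51 : Prop := ∀ (n : Int), Dom_solution51 n → Pre_solution51 n → Spec_solution51 n (solution51 n)

-- ===== LEMMAS AND PROOFS =====

-- the prime factorization of N, ascending, as integers
def pvPFL (N : Nat) : List Int := N.primeFactorsList.map (fun p => (p : Int))

theorem pvPFL_cons {N : Nat} (h : 2 ≤ N) :
    pvPFL N = (N.minFac : Int) :: pvPFL (N / N.minFac) := by
  match N, h with
  | (k + 2), _ => simp [pvPFL, Nat.primeFactorsList_add_two]

-- divideOut spec
theorem pvDivideOut_spec (m d : Int) (acc : List Int)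
    (hm : 0 < m) (hd : 1 < d)
    (hfac : ∀ p : Nat, p.Prime → (p : Int) ∣ m → d ≤ (p : Int)) :
    0 < (pvDivideOut m d acc).1 ∧
    (∀ p : Nat, p.Prime → (p : Int) ∣ (pvDivideOut m d acc).1 → d < (p : Int)) ∧
    (pvDivideOut m d acc).2 ++ pvPFL (pvDivideOut m d acc).1.toNat
      = acc ++ pvPFL m.toNat := by
  revert hm hd hfac
  fun_induction pvDivideOut with
  | case1 m acc hg ih =>
    intro hm hd hfac
    obtain ⟨h1, h2, h3⟩ := hg
    have hdvd : d ∣ m := (PySem.Int.mod_eq_zero_iff_dvd m d).mp h1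
    have hm' : m = ((m.toNat : Nat) : Int) := by omega
    have hd' : d = ((d.toNat : Nat) : Int) := by omega
    have hDM : d.toNat ∣ m.toNat := by
      rw [hm', hd'] at hdvd; exact_mod_cast hdvd
    have hM2 : 2 ≤ m.toNat := by
      have := Nat.le_of_dvd (by omega) hDM; omega
    have hminfac : m.toNat.minFac = d.toNat := by
      refine le_antisymm (Nat.minFac_le_of_dvd (by omega) hDM) ?_
      have hp := Nat.minFac_prime (n := m.toNat) (by omega)
      have hdv : ((m.toNat.minFac : Nat) : Int) ∣ m := by
        rw [hm']; exact_mod_cast Nat.minFac_dvd m.toNat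
      have := hfac m.toNat.minFac hp hdv; omega
    have hfd : PySem.Int.floordiv m d = ((m.toNat / d.toNat : Nat) : Int) := by
      rw [hm', hd']; exact PySem.Int.floordiv_natCast m.toNat d.toNat
    have hMD : 0 < m.toNat / d.toNat := Nat.div_pos (Nat.le_of_dvd (by omega) hDM) (by omega)
    have hm2 : 0 < PySem.Int.floordiv m d := by rw [hfd]; exact_mod_cast hMD
    have hfac2 : ∀ p : Nat, p.Prime → (p : Int) ∣ PySem.Int.floordiv m d → d ≤ (p : Int) := by
      intro p pp pd
      refine hfac p pp (dvd_trans pd ?_)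
      rw [hfd, hm']
      exact_mod_cast Nat.div_dvd_of_dvd hDM
    obtain ⟨ih1, ih2, ih3⟩ := ih hm2 h2 hfac2
    refine ⟨ih1, ih2, ?_⟩
    rw [ih3]
    have hfdt : (PySem.Int.floordiv m d).toNat = m.toNat / d.toNat := by omega
    rw [hfdt, pvPFL_cons hM2, hminfac]
    have hcast : ((d.toNat : Nat) : Int) = d := by omega
    rw [hcast]
    simp
  | case2 m acc hg =>
    intro hm hd hfac
    have hnd : ¬ d ∣ m := fun hdv => hg ⟨(PySem.Int.mod_eq_zero_iff_dvd m d).mpr hdv, hd, hm⟩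
    refine ⟨hm, ?_, rfl⟩
    intro p pp pd
    rcases lt_or_eq_of_le (hfac p pp pd) with h | h
    · exact h
    · exact absurd (h ▸ pd) hnd

-- outer loop spec
theorem pvOuter_spec (m d : Int) (acc : List Int)
    (hm : 0 < m) (hd : 2 ≤ d)
    (hfac : ∀ p : Nat, p.Prime → (p : Int) ∣ m → d ≤ (p : Int)) :
    (pvOuter m d acc).2 ++ pvPFL (pvOuter m d acc).1.toNat = acc ++ pvPFL m.toNat ∧
    0 < (pvOuter m d acc).1 ∧
    ((pvOuter m d acc).1 = 1 ∨ (pvOuter m d acc).1.toNat.Prime) := by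
  revert hm hd hfac
  fun_induction pvOuter with
  | case1 m d acc hg r ih =>
    intro hm hd hfac
    obtain ⟨hs1, hs2, hs3⟩ := pvDivideOut_spec m d acc hm (by omega) hfac
    obtain ⟨ih1, ih2, ih3⟩ := ih hs1 (by omega) (fun p pp pd => by
      have := hs2 p pp pd; omega)
    refine ⟨?_, ih2, ih3⟩
    rw [ih1, hs3]
  | case2 m d acc hg =>
    intro hm hd hfac
    refine ⟨rfl, hm, ?_⟩
    by_cases h1 : m = 1
    · exact Or.inl h1
    · right
      have hM2 : 2 ≤ m.toNat := by omega
      by_contra hnp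
      have hsq := Nat.minFac_sq_le_self (n := m.toNat) (by omega) hnp
      have hmf := Nat.minFac_prime (n := m.toNat) (by omega)
      have hdvd : ((m.toNat.minFac : Nat) : Int) ∣ m := by
        have : m = ((m.toNat : Nat) : Int) := by omega
        rw [this]; exact_mod_cast Nat.minFac_dvd m.toNat
      have hge := hfac m.toNat.minFac hmf hdvd
      have hle : m.toNat.minFac ≤ Nat.sqrt m.toNat := Nat.le_sqrt.mpr (by nlinarith)
      have hgt : (Nat.sqrt m.toNat : Int) < d := by omega
      omega

-- B computes: the factorization if it has exactly two elements, else []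
theorem solution51_alt_def (n : Int) :
    solution51_alt n =
      (if ((if 1 < (pvOuter n 2 []).1 then (pvOuter n 2 []).2 ++ [(pvOuter n 2 []).1]
            else (pvOuter n 2 []).2).length == 2) = true
       then (if 1 < (pvOuter n 2 []).1 then (pvOuter n 2 []).2 ++ [(pvOuter n 2 []).1]
             else (pvOuter n 2 []).2)
       else []) := rfl

theorem solution51_alt_eq (n : Int) (hn : 0 ≤ n) :
    solution51_alt n =
      (if (n.toNat.primeFactorsList).length = 2 then pvPFL n.toNat else []) := by
  rcases eq_or_lt_of_le hn with h0 | h0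
  · -- n = 0
    rw [← h0, solution51_alt_def]
    simp [pvOuter]
  · -- 0 < n
    obtain ⟨heq, hpos, hcase⟩ := pvOuter_spec n 2 [] h0 (le_refl 2)
      (fun p pp _ => by exact_mod_cast pp.two_le)
    simp only [List.nil_append] at heq
    rw [solution51_alt_def]
    rcases hcase with h1 | h1
    · have hfl : pvPFL (pvOuter n 2 []).1.toNat = [] := by
        rw [h1]; simp [pvPFL]
      rw [hfl, List.append_nil] at heq
      rw [h1]
      simp only [show ¬(1:Int) < 1 by omega, if_false]
      rw [heq]
      simp [pvPFL, beq_iff_eq]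
    · have h2 : 2 ≤ (pvOuter n 2 []).1 := by
        have := h1.two_le; omega
      have hfl : pvPFL (pvOuter n 2 []).1.toNat = [(pvOuter n 2 []).1] := by
        rw [pvPFL, Nat.primeFactorsList_prime h1]
        simp [Int.toNat_of_nonneg (by omega : (0:Int) ≤ (pvOuter n 2 []).1)]
      rw [hfl] at heq
      simp only [show (1:Int) < (pvOuter n 2 []).1 by omega, if_true]
      rw [heq]
      simp [pvPFL, beq_iff_eq]

-- isPrime correctness on a ≥ 2
theorem pvIsPrime_iff (a : Int) (ha : 2 ≤ a) : pvIsPrime a = true ↔ a.toNat.Prime := by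
  rcases eq_or_lt_of_le ha with h2 | h3
  · rw [← h2]
    simp only [pvIsPrime, if_pos (by omega : (2:Int) ≤ 2)]
    decide
  · have ha2 : ¬ a ≤ 2 := by omega
    rw [pvIsPrime, if_neg ha2, List.all_eq_true]
    constructor
    · intro hall
      rw [Nat.prime_def_le_sqrt]
      refine ⟨by omega, ?_⟩
      intro k hk2 hksqrt hkdvd
      have hmem : ((k : Nat) : Int) ∈ PySem.List.pyRange 2 ((Nat.sqrt a.toNat : Int) + 1) 1 := by
        rw [PySem.List.mem_pyRange_one]
        constructor
        · exact_mod_cast hk2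
        · omega
      have hthis := hall _ hmem
      simp only [Bool.not_eq_true', beq_eq_false_iff_ne, ne_eq] at hthis
      apply hthis
      rw [PySem.Int.mod_eq_zero_iff_dvd]
      have h2 : a = ((a.toNat : Nat) : Int) := by omega
      rw [h2]; exact_mod_cast hkdvd
    · intro hp i hi
      rw [PySem.List.mem_pyRange_one] at hi
      simp only [Bool.not_eq_true', beq_eq_false_iff_ne, ne_eq]
      intro h0
      have hdvd : i ∣ a := (PySem.Int.mod_eq_zero_iff_dvd a i).mp h0
      have hidvd : i.toNat ∣ a.toNat := by
        have h1 : i = ((i.toNat : Nat) : Int) := by omega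
        have h2 : a = ((a.toNat : Nat) : Int) := by omega
        rw [h1, h2] at hdvd; exact_mod_cast hdvd
      rw [Nat.prime_def_le_sqrt] at hp
      exact hp.2 i.toNat (by omega) (by omega) hidvd

-- A computes the same expression
theorem solution51_eq (n : Int) (hn : 0 ≤ n) :
    solution51 n =
      (if (n.toNat.primeFactorsList).length = 2 then pvPFL n.toNat else []) := by
  have hnN : n = ((n.toNat : Nat) : Int) := by omega
  set N := n.toNat with hN
  by_cases hlen : N.primeFactorsList.length = 2
  · -- exactly two prime factors: A finds the smallest one
    obtain ⟨p, q, hpq⟩ := List.length_eq_two.mp hlen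
    have hN0 : N ≠ 0 := by
      intro h; rw [h] at hpq; simp at hpq
    have hp : p.Prime := Nat.prime_of_mem_primeFactorsList (by rw [hpq]; simp)
    have hq : q.Prime := Nat.prime_of_mem_primeFactorsList (by rw [hpq]; simp)
    have hprod : p * q = N := by
      have h := Nat.prod_primeFactorsList hN0
      rw [hpq] at h; simpa using h
    have hN2 : 2 ≤ N := by nlinarith [hp.two_le, hq.two_le]
    have hcons : N.primeFactorsList = N.minFac :: (N / N.minFac).primeFactorsList := by
      match N, hN2 with
      | (k + 2), _ => exact Nat.primeFactorsList_add_two k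
    have hpeq : p = N.minFac := by
      rw [hpq] at hcons
      exact (List.cons_eq_cons.mp hcons).1
    have hmin : ∀ x : Nat, 2 ≤ x → x ∣ N → p ≤ x := fun x h2 hx =>
      hpeq ▸ Nat.minFac_le_of_dvd h2 hx
    have hple : p ≤ q := hmin q hq.two_le ⟨p, by rw [← hprod]; ring⟩
    have hpsqrt : p ≤ Nat.sqrt N := Nat.le_sqrt.mpr (by nlinarith)
    have hNdivp : N / p = q := by
      rw [← hprod]; exact Nat.mul_div_cancel_left q hp.pos
    have hfd : PySem.Int.floordiv n (p : Int) = (q : Int) := by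
      rw [hnN, PySem.Int.floordiv_natCast, hNdivp]
    unfold solution51
    rw [← hN]
    rw [PySem.List.pyRange_one_append 2 (p : Int) ((Nat.sqrt N : Int) + 1)
          (by exact_mod_cast hp.two_le) (by omega),
        List.find?_append]
    have h1 : (PySem.List.pyRange 2 (p : Int) 1).find?
        (fun x => PySem.Int.mod n x == 0 && pvIsPrime x && pvIsPrime (PySem.Int.floordiv n x)) = none := by
      rw [List.find?_eq_none]
      intro x hx hPx
      rw [PySem.List.mem_pyRange_one] at hx
      simp only [Bool.and_eq_true, beq_iff_eq] at hPx
      obtain ⟨⟨hc1, _⟩, _⟩ := hPx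
      have hxdvd : x ∣ n := (PySem.Int.mod_eq_zero_iff_dvd n x).mp hc1
      have hXdvd : x.toNat ∣ N := by
        have h1 : x = ((x.toNat : Nat) : Int) := by omega
        rw [h1, hnN] at hxdvd; exact_mod_cast hxdvd
      have := hmin x.toNat (by omega) hXdvd
      omega
    rw [h1, Option.none_or]
    rw [PySem.List.pyRange_one_cons (by omega : (p : Int) < (Nat.sqrt N : Int) + 1)]
    rw [List.find?_cons_of_pos]
    · rw [if_pos hlen]
      show [(p : Int), PySem.Int.floordiv n (p : Int)] = pvPFL N
      rw [hfd, pvPFL, hpq]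
      simp
    · simp only [Bool.and_eq_true, beq_iff_eq]
      refine ⟨⟨?_, ?_⟩, ?_⟩
      · rw [PySem.Int.mod_eq_zero_iff_dvd, hnN]
        exact_mod_cast (⟨q, hprod.symm⟩ : (p : Nat) ∣ N)
      · rw [pvIsPrime_iff _ (by exact_mod_cast hp.two_le)]
        simpa using hp
      · rw [hfd, pvIsPrime_iff _ (by exact_mod_cast hq.two_le)]
        simpa using hq
  · -- not a semiprime: no candidate passes all three tests
    unfold solution51
    rw [← hN]
    have hnone : (PySem.List.pyRange 2 ((Nat.sqrt N : Int) + 1) 1).find?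
        (fun x => PySem.Int.mod n x == 0 && pvIsPrime x && pvIsPrime (PySem.Int.floordiv n x)) = none := by
      rw [List.find?_eq_none]
      intro x hx hPx
      rw [PySem.List.mem_pyRange_one] at hx
      simp only [Bool.and_eq_true, beq_iff_eq] at hPx
      obtain ⟨⟨hc1, hc2⟩, hc3⟩ := hPx
      have hx2 : (2 : Int) ≤ x := hx.1
      have hXs : x.toNat ≤ Nat.sqrt N := by omega
      have hXX : x.toNat * x.toNat ≤ N := Nat.le_sqrt.mp hXs
      have hX2 : 2 ≤ x.toNat := by omega
      have hN4 : 4 ≤ N := by nlinarith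
      have hxdvd : x ∣ n := (PySem.Int.mod_eq_zero_iff_dvd n x).mp hc1
      have hXdvd : x.toNat ∣ N := by
        have h1 : x = ((x.toNat : Nat) : Int) := by omega
        rw [h1, hnN] at hxdvd; exact_mod_cast hxdvd
      have hNXY : N = x.toNat * (N / x.toNat) := by
        rw [Nat.mul_div_cancel' hXdvd]
      have hYX : x.toNat ≤ N / x.toNat :=
        Nat.le_of_mul_le_mul_left (hXX.trans_eq hNXY) (by omega)
      have hXp : x.toNat.Prime := (pvIsPrime_iff x hx2).mp hc2
      have hfd : PySem.Int.floordiv n x = ((N / x.toNat : Nat) : Int) := by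
        have hx' : x = ((x.toNat : Nat) : Int) := by omega
        rw [hnN, hx', PySem.Int.floordiv_natCast]
        simp
      have hYp : (N / x.toNat).Prime := by
        have h2Y : (2 : Int) ≤ ((N / x.toNat : Nat) : Int) := by
          exact_mod_cast (by omega : 2 ≤ N / x.toNat)
        have hh := (pvIsPrime_iff ((N / x.toNat : Nat) : Int) h2Y).mp (by rw [← hfd]; exact hc3)
        rwa [Int.toNat_natCast] at hh
      apply hlen
      have hperm := Nat.perm_primeFactorsList_mul (a := x.toNat) (b := N / x.toNat)
        (by omega) (by omega)
      rw [← hNXY] at hperm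
      rw [hperm.length_eq]
      simp [Nat.primeFactorsList_prime hXp, Nat.primeFactorsList_prime hYp]
    rw [hnone, if_neg hlen]

-- ===== VERDICT (by name: the statement is the Claim_ definition above) =====
theorem solution51_spec : Claim_equal_solution51 := by
  intro n _ hp
  unfold Spec_solution51
  rw [solution51_eq n hp, solution51_alt_eq n hp]
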